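-- pv_equiv track=rewrite | github.com/zhr1996/Google-Cloud-Dataflow | pipeline.py | process_game
-- ===== SOURCE A (Python) =====
-- def process_game(element):
--     (index, li) = element
--     max_bought = -1
--     result = []
--     for tu in li:
--         (game, count) = tu
--         if game == index:
--             continue
--         if count == max_bought:
--             result.append(game)
--         elif count > max_bought:
--             max_bought = count
--             result = [game]
--
--     if max_bought == -1:
--         return (index + "\t" + "None" + "\t" + "0")
--     else:
--         result.sort(key=lambda x: int(x[2:]))
--         output = index + "\t"
--         for game in result:
--             output += game + "\t"
--         output += str(max_bought)
--         return output
-- ===== SOURCE B (Python) =====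
-- def process_game(element):
--     (index, li) = element
--     pool = [(game, count) for (game, count) in li if game != index]
--     m = max([count for (_, count) in pool], default=-1)
--     if m <= -1:
--         return "\t".join([index, "None", "0"])
--     winners = sorted([game for (game, count) in pool if count == m],
--                      key=lambda x: int(x[2:]))
--     return "\t".join([index] + winners + [str(m)])
-- ===== Notes on version B (the rewrite author's own statement) =====
-- stated objective: idiomatic
-- what changed: A's single interleaved running-max loop with sentinel -1 and in-loop winner-list resets is replaced by a filter/max/filter decomposition: build the filtered pool once, take max(counts, default=-1), and only then collect and sort the games whose count equals that maximum, joining the output with '\t'.join instead of an accumulating loop.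
import Mathlib
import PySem

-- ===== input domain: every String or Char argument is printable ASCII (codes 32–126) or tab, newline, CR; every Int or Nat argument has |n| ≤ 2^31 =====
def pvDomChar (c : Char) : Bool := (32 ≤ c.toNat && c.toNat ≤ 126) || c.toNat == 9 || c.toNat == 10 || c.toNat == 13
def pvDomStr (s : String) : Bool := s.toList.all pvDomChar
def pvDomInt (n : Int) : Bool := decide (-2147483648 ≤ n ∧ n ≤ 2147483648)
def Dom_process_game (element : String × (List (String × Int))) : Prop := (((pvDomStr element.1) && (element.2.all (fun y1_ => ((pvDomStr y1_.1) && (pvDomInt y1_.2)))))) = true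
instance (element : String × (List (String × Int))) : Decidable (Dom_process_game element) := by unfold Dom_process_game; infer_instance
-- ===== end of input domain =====

-- B replaces A's interleaved running-max loop (sentinel -1, in-loop winner resets,
-- string accumulation) by a filter / max / filter decomposition with "\t".join (objective: idiomatic).

-- the sort key  lambda x: int(x[2:])  that both Pythons pass to sort; the `.getD 0` arm is
-- exactly where Python's int() raises ValueError — those inputs are excluded by Pre_process_game.
def pgKey (g : String) : Int :=
  (PySem.Int.ofStr? (PySem.Str.slice g (some 2) none)).getD 0

-- ===== PORT A =====
-- A's loop: running max `max_bought` (sentinel -1) and winner list `result`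
def pgLoopA (idx : String) : List (String × Int) → Int → List String → Int × List String
  | [], m, r => (m, r)
  | (g, c) :: rest, m, r =>
    if g = idx then pgLoopA idx rest m r
    else if c = m then pgLoopA idx rest m (r ++ [g])
    else if m < c then pgLoopA idx rest c [g]
    else pgLoopA idx rest m r

def process_game (element : String × (List (String × Int))) : String :=
  let index := element.1
  let res := pgLoopA index element.2 (-1) []
  if res.1 = -1 then
    index ++ "\t" ++ "None" ++ "\t" ++ "0"
  else
    let result := PySem.List.sorted res.2 pgKey
    let output := index ++ "\t"
    let output := result.foldl (fun o g => o ++ g ++ "\t") output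
    output ++ PySem.Int.toStr res.1

-- ===== PORT B =====
def process_game_alt (element : String × (List (String × Int))) : String :=
  let index := element.1
  let pool := element.2.filter (fun p => !(p.1 == index))
  let m := PySem.List.maxD (pool.map (fun p => p.2)) (fun c => c) (-1)
  if m ≤ -1 then
    PySem.Str.join "\t" [index, "None", "0"]
  else
    let winners := PySem.List.sorted ((pool.filter (fun p => p.2 == m)).map (fun p => p.1)) pgKey
    PySem.Str.join "\t" ([index] ++ winners ++ [PySem.Int.toStr m])

-- ===== PRECONDITION & SPEC =====
-- Pre_ excludes exactly the inputs on which Python A raises ValueError: some maximal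
-- filtered pair has count > -1 but its game name's suffix game[2:] is not int()-parsable.
def Pre_process_game (element : String × (List (String × Int))) : Prop :=
  ∀ p ∈ element.2, p.1 ≠ element.1 →
    (∀ q ∈ element.2, q.1 ≠ element.1 → q.2 ≤ p.2) → -1 < p.2 →
    (PySem.Int.ofStr? (PySem.Str.slice p.1 (some 2) none)).isSome = true
instance (element : String × (List (String × Int))) : Decidable (Pre_process_game element) := by
  unfold Pre_process_game; infer_instance
def pvWitness_process_game : (String × (List (String × Int))) := ("me", [("g_1", 2), ("g_2", 2)])

def Spec_process_game (element : String × (List (String × Int))) (out : String) : Prop := out = process_game_alt element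
instance (element : String × (List (String × Int))) (out : String) : Decidable (Spec_process_game element out) := by unfold Spec_process_game; infer_instance

-- ===== CLAIM (what is proved, stated in full; the proofs are below) =====
def Claim_equal_process_game : Prop := ∀ (element : String × (List (String × Int))), Dom_process_game element → Pre_process_game element → Spec_process_game element (process_game element)

-- ===== LEMMAS AND PROOFS =====

-- running max of the filtered counts of l, seeded with m (what A's `max_bought` computes)
def pgMx (idx : String) (l : List (String × Int)) (m : Int) : Int :=
  l.foldl (fun a p => if p.1 = idx then a else max a p.2) m

-- the games of l (≠ idx) whose count is M, in list order (what A's `result` holds)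
def pgWins (idx : String) (M : Int) (l : List (String × Int)) : List String :=
  (l.filter (fun p => !(p.1 == idx) && (p.2 == M))).map (fun p => p.1)

theorem le_pgMx (idx : String) (l : List (String × Int)) (m : Int) : m ≤ pgMx idx l m := by
  induction l generalizing m with
  | nil => simp [pgMx]
  | cons p t ih =>
    simp only [pgMx, List.foldl_cons]
    by_cases h : p.1 = idx
    · simpa [h] using ih m
    · simp only [h, if_false]
      exact le_trans (le_max_left _ _) (ih _)

-- the characterisation of A's loop: final max is pgMx, final list is the (possibly
-- r-prefixed) winners of the suffix
theorem pgLoopA_inv (idx : String) (l : List (String × Int)) (m : Int) (r : List String) :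
    pgLoopA idx l m r =
      (pgMx idx l m, (if pgMx idx l m = m then r else []) ++ pgWins idx (pgMx idx l m) l) := by
  induction l generalizing m r with
  | nil => simp [pgLoopA, pgMx, pgWins]
  | cons p t ih =>
    obtain ⟨g, c⟩ := p
    by_cases hg : g = idx
    · simp only [pgLoopA]
      rw [if_pos hg, ih]
      simp [pgMx, pgWins, hg]
    · have hMx : pgMx idx ((g, c) :: t) m = pgMx idx t (max m c) := by
        simp [pgMx, hg]
      by_cases hc : c = m
      · simp only [pgLoopA]
        rw [if_neg hg, if_pos hc, ih]
        have hmm : max m c = m := by omega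
        rw [hMx, hmm]
        by_cases hEq : pgMx idx t m = m
        · simp [hEq, pgWins, hg, hc]
        · have hlt : m < pgMx idx t m := lt_of_le_of_ne (le_pgMx idx t m) (Ne.symm hEq)
          have hcM : ¬ (c = pgMx idx t m) := by omega
          simp [hEq, pgWins, hg, hcM]
      · by_cases hlt : m < c
        · simp only [pgLoopA]
          rw [if_neg hg, if_neg hc, if_pos hlt, ih]
          have hmax : max m c = c := by omega
          rw [hMx, hmax]
          have hMne : ¬ (pgMx idx t c = m) := by
            have := le_pgMx idx t c; omega
          by_cases hEq : pgMx idx t c = c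
          · simp [hEq, hc, pgWins, hg]
          · have hcM : ¬ (c = pgMx idx t c) := fun h => hEq h.symm
            simp [hEq, hMne, pgWins, hg, hcM]
        · simp only [pgLoopA]
          rw [if_neg hg, if_neg hc, if_neg hlt, ih]
          have hmax : max m c = m := by omega
          rw [hMx, hmax]
          have hcM : ¬ (c = pgMx idx t m) := by
            have := le_pgMx idx t m; omega
          simp [pgWins, hg, hcM]

theorem foldl_max_max (t : List Int) (a b : Int) :
    List.foldl max (max a b) t = max a (List.foldl max b t) := by
  induction t generalizing b with
  | nil => rfl
  | cons c t ih => simp only [List.foldl_cons, max_assoc, ih]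

-- A's sentinel-seeded running max is max(-1, B's max-with-default)
theorem pgMx_eq_maxD (idx : String) (l : List (String × Int)) :
    pgMx idx l (-1) =
      max (-1)
        (PySem.List.maxD ((l.filter (fun p => !(p.1 == idx))).map (fun p => p.2)) (fun c => c) (-1)) := by
  have h1 : ∀ (m : Int), pgMx idx l m = ((l.filter (fun p => !(p.1 == idx))).map (fun p => p.2)).foldl max m := by
    intro m
    induction l generalizing m with
    | nil => simp [pgMx]
    | cons p t ih =>
      by_cases h : p.1 = idx
      · simp [pgMx, h] at ih ⊢
        exact ih m
      · simp [pgMx, h] at ih ⊢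
        exact ih (max m p.2)
  rw [h1]
  cases hfl : (l.filter (fun p => !(p.1 == idx))).map (fun p => p.2) with
  | nil => simp [PySem.List.maxD_nil]
  | cons c cs =>
    rw [PySem.List.maxD_id_cons, List.foldl_cons, foldl_max_max]

theorem none_join (s : String) :
    s ++ "\t" ++ "None" ++ "\t" ++ "0" = PySem.Str.join "\t" [s, "None", "0"] := by
  apply String.toList_inj.mp
  simp [String.toList_append, PySem.Str.toList_join, PySem.Chars.join_cons_cons, PySem.Chars.join_singleton]

theorem join_merge (sep a b : List Char) (L : List (List Char)) :
    PySem.Chars.join sep ((a ++ sep ++ b) :: L) = a ++ sep ++ PySem.Chars.join sep (b :: L) := by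
  cases L with
  | nil => simp [PySem.Chars.join_singleton]
  | cons q R =>
    rw [PySem.Chars.join_cons_cons, PySem.Chars.join_cons_cons]
    simp

-- A's accumulating output loop builds exactly "\t".join([s] + ws + [z])
theorem out_join (ws : List String) (s z : String) :
    (ws.foldl (fun o g => o ++ g ++ "\t") (s ++ "\t")) ++ z =
      PySem.Str.join "\t" (s :: ws ++ [z]) := by
  apply String.toList_inj.mp
  induction ws generalizing s with
  | nil =>
    simp [String.toList_append, PySem.Str.toList_join, PySem.Chars.join_cons_cons, PySem.Chars.join_singleton]
  | cons w ws ih =>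
    have h : (s ++ "\t") ++ w ++ "\t" = ((s ++ "\t" ++ w) ++ "\t") := by simp [String.append_assoc]
    simp only [List.foldl_cons, List.cons_append]
    rw [h]
    rw [ih (s ++ "\t" ++ w)]
    simp only [PySem.Str.toList_join, List.map_cons, List.map_append, List.map_nil]
    have ha : (s ++ "\t" ++ w).toList = s.toList ++ "\t".toList ++ w.toList := by
      simp [String.toList_append]
    rw [ha, List.cons_append, join_merge, PySem.Chars.join_cons_cons]

-- ===== VERDICT (by name: the statement is the Claim_ definition above) =====
theorem process_game_spec : Claim_equal_process_game := by
  intro element _hDom _hPre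
  unfold Spec_process_game
  obtain ⟨index, li⟩ := element
  show process_game (index, li) = process_game_alt (index, li)
  unfold process_game process_game_alt
  simp only
  rw [pgLoopA_inv]
  have hnil : (if pgMx index li (-1) = -1 then ([] : List String) else []) ++ pgWins index (pgMx index li (-1)) li = pgWins index (pgMx index li (-1)) li := by
    split <;> simp
  rw [hnil]
  set mB : Int := PySem.List.maxD (List.map (fun p => p.2) (List.filter (fun p => !p.1 == index) li)) (fun c => c) (-1) with hmB
  have hM : pgMx index li (-1) = max (-1) mB := pgMx_eq_maxD index li
  by_cases hle : mB ≤ -1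
  · have h1 : pgMx index li (-1) = -1 := by omega
    simp only [h1, if_pos hle, reduceIte]
    exact none_join index
  · have h1 : pgMx index li (-1) = mB := by omega
    have h2 : ¬ (pgMx index li (-1) = -1) := by omega
    simp only [h1, if_neg hle]
    rw [if_neg (by omega : ¬ mB = -1)]
    have hwins : pgWins index mB li =
        List.map (fun p => p.1) (List.filter (fun p => p.2 == mB) (List.filter (fun p => !p.1 == index) li)) := by
      unfold pgWins
      rw [List.filter_filter]
      simp [Bool.and_comm]
    rw [hwins, out_join]
    simp
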